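-- pv_equiv track=rewrite | github.com/Bypus/discord-chaton-bot | cogs/message_handlers.py | reverse_nitter_urls
-- ===== SOURCE A (Python) =====
-- def reverse_nitter_urls(text: str) -> str:
--     """Reverse Nitter privacy URL substitutions back to originals."""
--     replacements = {
--         "piped.video/": "youtu.be/",
--         "piped.kavin.rocks/": "youtu.be/",
--         "inv.nadeko.net/": "youtube.com/",
--         "invidious.snopyta.org/": "youtube.com/",
--     }
--     for nitter_domain, original_domain in replacements.items():
--         text = text.replace(nitter_domain, original_domain)
--     return text
-- ===== SOURCE B (Python) =====
-- def reverse_nitter_urls(text: str) -> str: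
--     """Reverse Nitter privacy URL substitutions back to originals."""
--     pairs = [
--         ("piped.video/", "youtu.be/"),
--         ("piped.kavin.rocks/", "youtu.be/"),
--         ("inv.nadeko.net/", "youtube.com/"),
--         ("invidious.snopyta.org/", "youtube.com/"),
--     ]
--     out = []
--     i = 0
--     n = len(text)
--     while i < n:
--         for key, orig in pairs:
--             if text.startswith(key, i):
--                 out.append(orig)
--                 i += len(key)
--                 break
--         else:
--             out.append(text[i])
--             i += 1
--     return "".join(out)
-- ===== Notes on version B (the rewrite author's own statement) =====
-- stated objective: alternative
-- what changed: Replaces A's four sequential full-text str.replace passes by a single left-to-right scan that at each position tries the four keys in order, appends the matched key's original domain (or the current character) and advances past it.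
import Mathlib
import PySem

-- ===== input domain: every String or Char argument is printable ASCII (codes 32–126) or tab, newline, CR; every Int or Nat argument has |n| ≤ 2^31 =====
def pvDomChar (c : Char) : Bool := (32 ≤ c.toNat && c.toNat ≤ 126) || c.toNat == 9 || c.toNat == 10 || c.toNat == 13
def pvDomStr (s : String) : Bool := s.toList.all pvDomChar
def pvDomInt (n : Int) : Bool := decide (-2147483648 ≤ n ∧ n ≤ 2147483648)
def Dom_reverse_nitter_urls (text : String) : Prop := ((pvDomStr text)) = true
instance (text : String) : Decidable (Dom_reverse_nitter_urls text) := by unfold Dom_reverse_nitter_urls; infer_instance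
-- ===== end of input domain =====

-- B replaces A's four sequential full-text str.replace passes by one left-to-right scan
-- that tries the four keys in order at each position (alternative decomposition, same result).

-- ===== PORT A =====
def reverse_nitter_urls (text : String) : String :=
  let text := PySem.Str.replace text "piped.video/" "youtu.be/"
  let text := PySem.Str.replace text "piped.kavin.rocks/" "youtu.be/"
  let text := PySem.Str.replace text "inv.nadeko.net/" "youtube.com/"
  let text := PySem.Str.replace text "invidious.snopyta.org/" "youtube.com/"
  text

-- ===== PORT B =====
-- the (key, original) pairs of Source B, as character lists
def K1 : List Char := ['p','i','p','e','d','.','v','i','d','e','o','/']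
def K2 : List Char := ['p','i','p','e','d','.','k','a','v','i','n','.','r','o','c','k','s','/']
def K3 : List Char := ['i','n','v','.','n','a','d','e','k','o','.','n','e','t','/']
def K4 : List Char := ['i','n','v','i','d','i','o','u','s','.','s','n','o','p','y','t','a','.','o','r','g','/']
def V1 : List Char := ['y','o','u','t','u','.','b','e','/']
def V2 : List Char := ['y','o','u','t','u','b','e','.','c','o','m','/']

-- Source B's while-loop: at the current position try the keys in order (text.startswith(key, i));
-- on a match emit the original domain and advance by len(key), otherwise copy one character.
def scanB (s : List Char) : List Char :=
  match s with
  | [] => []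
  | c :: t =>
    if K1.isPrefixOf (c :: t) then V1 ++ scanB ((c :: t).drop K1.length)
    else if K2.isPrefixOf (c :: t) then V1 ++ scanB ((c :: t).drop K2.length)
    else if K3.isPrefixOf (c :: t) then V2 ++ scanB ((c :: t).drop K3.length)
    else if K4.isPrefixOf (c :: t) then V2 ++ scanB ((c :: t).drop K4.length)
    else c :: scanB t
termination_by s.length
decreasing_by all_goals simp [K1, K2, K3, K4]

def reverse_nitter_urls_alt (text : String) : String :=
  String.ofList (scanB text.toList)

-- ===== PRECONDITION & SPEC =====
def Spec_reverse_nitter_urls (text : String) (out : String) : Prop := out = reverse_nitter_urls_alt text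
instance (text : String) (out : String) : Decidable (Spec_reverse_nitter_urls text out) := by unfold Spec_reverse_nitter_urls; infer_instance

-- ===== CLAIM (what is proved, stated in full; the proofs are below) =====
def Claim_equal_reverse_nitter_urls : Prop := ∀ (text : String), Dom_reverse_nitter_urls text → Spec_reverse_nitter_urls text (reverse_nitter_urls text)

-- ===== LEMMAS AND PROOFS =====

-- reference scanner performing ONE str.replace pass (leftmost, non-overlapping)
def rep (old new : List Char) (s : List Char) : List Char :=
  match s with
  | [] => []
  | c :: t =>
    if old.isPrefixOf (c :: t) then new ++ rep old new (t.drop (old.length - 1))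
    else c :: rep old new t
termination_by s.length
decreasing_by all_goals simp [List.length_drop]

lemma rep_nil (old new : List Char) : rep old new [] = [] := by rw [rep]

lemma rep_cons_pos (old new : List Char) (c : Char) (t : List Char)
    (h : old.isPrefixOf (c :: t) = true) :
    rep old new (c :: t) = new ++ rep old new (t.drop (old.length - 1)) := by
  rw [rep]; simp [h]

lemma rep_cons_neg (old new : List Char) (c : Char) (t : List Char)
    (h : old.isPrefixOf (c :: t) = false) :
    rep old new (c :: t) = c :: rep old new t := by
  rw [rep]; simp [h]

lemma rep_match (old new : List Char) (h : old ≠ []) (t : List Char) :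
    rep old new (old ++ t) = new ++ rep old new t := by
  cases old with
  | nil => exact absurd rfl h
  | cons o0 o' =>
    rw [List.cons_append, rep_cons_pos]
    · simp
    · exact List.isPrefixOf_iff_prefix.mpr (by rw [← List.cons_append]; exact List.prefix_append _ _)

lemma isPrefixOf_eq_false_of_not (p l : List Char) (h : ¬ p <+: l) : p.isPrefixOf l = false :=
  Bool.eq_false_iff.mpr (fun hb => h (List.isPrefixOf_iff_prefix.mp hb))

lemma isPrefixOf_eq_false_of_mismatch (old l : List Char) (j : Nat)
    (hjo : j < old.length) (hne : l[j]? ≠ old[j]?) : old.isPrefixOf l = false := by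
  apply isPrefixOf_eq_false_of_not
  intro hp
  obtain ⟨r, rfl⟩ := hp
  exact hne (List.getElem?_append_left hjo)

-- every alignment of `pat` starting inside `w` already fails inside `w`
abbrev NoHit (pat w : List Char) : Prop :=
  ∀ i, i < w.length → ∃ j, j < pat.length ∧ i + j < w.length ∧ w[i + j]? ≠ pat[j]?

lemma noHit_shift (pat : List Char) (c : Char) (w : List Char)
    (H : NoHit pat (c :: w)) : NoHit pat w := by
  intro i hi
  obtain ⟨j, hj1, hj2, hj3⟩ := H (i + 1) (by simp only [List.length_cons]; omega)
  refine ⟨j, hj1, by simp at hj2; omega, ?_⟩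
  have he : i + 1 + j = (i + j) + 1 := by omega
  rw [he, List.getElem?_cons_succ] at hj3
  exact hj3

lemma rep_passthru (old new w : List Char) (H : NoHit old w) :
    ∀ t, rep old new (w ++ t) = w ++ rep old new t := by
  induction w with
  | nil => intro t; simp
  | cons c w ih =>
    intro t
    obtain ⟨j, hj1, hj2, hj3⟩ := H 0 (by simp)
    simp only [Nat.zero_add] at hj2 hj3
    have hne : old.isPrefixOf (c :: (w ++ t)) = false := by
      apply isPrefixOf_eq_false_of_mismatch old _ j hj1
      have he : (c :: (w ++ t))[j]? = (c :: w)[j]? := by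
        rw [show c :: (w ++ t) = (c :: w) ++ t from rfl, List.getElem?_append_left hj2]
      rw [he]; exact hj3
    calc rep old new ((c :: w) ++ t) = rep old new (c :: (w ++ t)) := rfl
      _ = c :: rep old new (w ++ t) := rep_cons_neg _ _ _ _ hne
      _ = c :: (w ++ rep old new t) := by rw [ih (noHit_shift _ _ _ H) t]
      _ = (c :: w) ++ rep old new t := rfl

-- if `p` cannot even partially contain the replacement string `new`,
-- then `p` being a prefix of a replaced text means it was a prefix of the original
lemma rep_reflect_aux (old new : List Char) :
    ∀ (n : Nat) (u p : List Char), u.length ≤ n → NoHit new p →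
      p <+: rep old new u → p <+: u := by
  intro n
  induction n with
  | zero =>
    intro u p hu _ hp
    have : u = [] := by cases u with | nil => rfl | cons a b => simp at hu
    subst this
    rwa [rep_nil] at hp
  | succ n ih =>
    intro u p hu H hp
    cases p with
    | nil => exact List.nil_prefix
    | cons q0 p' =>
      cases u with
      | nil =>
        rw [rep_nil] at hp
        exact absurd (List.IsPrefix.length_le hp) (by simp)
      | cons c t =>
        cases hpre : old.isPrefixOf (c :: t) with
        | true =>
          rw [rep_cons_pos _ _ _ _ hpre] at hp
          obtain ⟨j, hj1, hj2, hj3⟩ := H 0 (by simp)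
          simp only [Nat.zero_add] at hj2 hj3
          obtain ⟨r, hr⟩ := hp
          exfalso
          apply hj3
          calc (q0 :: p')[j]? = ((q0 :: p') ++ r)[j]? := (List.getElem?_append_left hj2).symm
            _ = (new ++ rep old new (t.drop (old.length - 1)))[j]? := by rw [hr]
            _ = new[j]? := List.getElem?_append_left hj1
        | false =>
          rw [rep_cons_neg _ _ _ _ hpre] at hp
          rw [List.cons_prefix_cons] at hp
          obtain ⟨rfl, hp'⟩ := hp
          exact List.cons_prefix_cons.mpr
            ⟨rfl, ih t p' (by simp at hu; omega) (noHit_shift _ _ _ H) hp'⟩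

lemma rep_reflect (old new p : List Char) (H : NoHit new p) (u : List Char)
    (hp : p <+: rep old new u) : p <+: u :=
  rep_reflect_aux old new u.length u p le_rfl H hp

-- bridge: PySem.Chars.replace (old ≠ []) is exactly `rep`
lemma go_eq_rep (old new : List Char) (hne : old ≠ []) :
    ∀ (fuel : Nat) (l acc : List Char), l.length ≤ fuel →
      PySem.Chars.replace.go old new fuel l acc = acc.reverse ++ rep old new l := by
  intro fuel
  induction fuel with
  | zero =>
    intro l acc hl
    have : l = [] := by cases l with | nil => rfl | cons a b => simp at hl
    subst this
    simp [PySem.Chars.replace.go, rep_nil]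
  | succ n ih =>
    intro l acc hl
    cases l with
    | nil => simp [PySem.Chars.replace.go, rep_nil]
    | cons c t =>
      have holen : 1 ≤ old.length := by
        cases old with | nil => exact absurd rfl hne | cons a b => simp
      cases hpre : old.isPrefixOf (c :: t) with
      | true =>
        have hstep : PySem.Chars.replace.go old new (n+1) (c :: t) acc
            = PySem.Chars.replace.go old new n ((c :: t).drop old.length) (new.reverse ++ acc) := by
          simp [PySem.Chars.replace.go, hpre]
        have hdrop : (c :: t).drop old.length = t.drop (old.length - 1) := by
          cases old with
          | nil => exact absurd rfl hne
          | cons a b => simp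
        rw [hstep, hdrop, ih _ _ (by simp at hl ⊢; omega), rep_cons_pos _ _ _ _ hpre]
        simp
      | false =>
        have hstep : PySem.Chars.replace.go old new (n+1) (c :: t) acc
            = PySem.Chars.replace.go old new n t (c :: acc) := by
          simp [PySem.Chars.replace.go, hpre]
        rw [hstep, ih _ _ (by simp at hl; omega), rep_cons_neg _ _ _ _ hpre]
        simp

lemma replace_eq_rep (s old new : List Char) (hne : old ≠ []) :
    PySem.Chars.replace s old new = rep old new s := by
  have hempty : old.isEmpty = false := by cases old with | nil => exact absurd rfl hne | cons a b => rfl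
  rw [PySem.Chars.replace, hempty]
  simpa using go_eq_rep old new hne s.length s [] le_rfl

-- scanB unfolding lemmas
lemma scanB_nil : scanB [] = [] := by rw [scanB]

lemma scanB_k1 (t : List Char) : scanB (K1 ++ t) = V1 ++ scanB t := by
  rw [scanB.eq_def]
  simp [K1, List.isPrefixOf]

lemma scanB_k2 (t : List Char) : scanB (K2 ++ t) = V1 ++ scanB t := by
  rw [scanB.eq_def]
  simp [K1, K2, List.isPrefixOf]

lemma scanB_k3 (t : List Char) : scanB (K3 ++ t) = V2 ++ scanB t := by
  rw [scanB.eq_def]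
  simp [K1, K2, K3, List.isPrefixOf]

lemma scanB_k4 (t : List Char) : scanB (K4 ++ t) = V2 ++ scanB t := by
  rw [scanB.eq_def]
  simp [K1, K2, K3, K4, List.isPrefixOf]

lemma scanB_cons_neg (c : Char) (t : List Char)
    (h1 : K1.isPrefixOf (c :: t) = false) (h2 : K2.isPrefixOf (c :: t) = false)
    (h3 : K3.isPrefixOf (c :: t) = false) (h4 : K4.isPrefixOf (c :: t) = false) :
    scanB (c :: t) = c :: scanB t := by
  rw [scanB.eq_def]
  simp [h1, h2, h3, h4]

-- tails of K2/K3/K4 after their first character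
def T2 : List Char := ['i','p','e','d','.','k','a','v','i','n','.','r','o','c','k','s','/']
def T3 : List Char := ['n','v','.','n','a','d','e','k','o','.','n','e','t','/']
def T4 : List Char := ['n','v','i','d','i','o','u','s','.','s','n','o','p','y','t','a','.','o','r','g','/']

-- the four sequential replace passes of A, over character lists
def repA (s : List Char) : List Char :=
  rep K4 V2 (rep K3 V2 (rep K2 V1 (rep K1 V1 s)))

lemma repA_eq_scanB_aux : ∀ (n : Nat) (s : List Char), s.length ≤ n → repA s = scanB s := by
  intro n
  induction n with
  | zero =>
    intro s hs
    have : s = [] := by cases s with | nil => rfl | cons a b => simp at hs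
    subst this
    simp [repA, rep_nil, scanB_nil]
  | succ n ih =>
    intro s hs
    by_cases h1 : K1 <+: s
    · obtain ⟨t, rfl⟩ := h1
      rw [repA, rep_match K1 V1 (by decide) t,
        rep_passthru K2 V1 V1 (by decide),
        rep_passthru K3 V2 V1 (by decide),
        rep_passthru K4 V2 V1 (by decide),
        scanB_k1, ← repA, ih t (by simp [K1] at hs; omega)]
    · by_cases h2 : K2 <+: s
      · obtain ⟨t, rfl⟩ := h2
        rw [repA, rep_passthru K1 V1 K2 (by decide),
          rep_match K2 V1 (by decide),
          rep_passthru K3 V2 V1 (by decide),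
          rep_passthru K4 V2 V1 (by decide),
          scanB_k2, ← repA, ih t (by simp [K2] at hs; omega)]
      · by_cases h3 : K3 <+: s
        · obtain ⟨t, rfl⟩ := h3
          rw [repA, rep_passthru K1 V1 K3 (by decide),
            rep_passthru K2 V1 K3 (by decide),
            rep_match K3 V2 (by decide),
            rep_passthru K4 V2 V2 (by decide),
            scanB_k3, ← repA, ih t (by simp [K3] at hs; omega)]
        · by_cases h4 : K4 <+: s
          · obtain ⟨t, rfl⟩ := h4
            rw [repA, rep_passthru K1 V1 K4 (by decide),
              rep_passthru K2 V1 K4 (by decide),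
              rep_passthru K3 V2 K4 (by decide),
              rep_match K4 V2 (by decide),
              scanB_k4, ← repA, ih t (by simp [K4] at hs; omega)]
          · cases s with
            | nil => simp [repA, rep_nil, scanB_nil]
            | cons c t =>
              have b1 : K1.isPrefixOf (c :: t) = false := isPrefixOf_eq_false_of_not _ _ h1
              have b2 : K2.isPrefixOf (c :: t) = false := isPrefixOf_eq_false_of_not _ _ h2
              have b3 : K3.isPrefixOf (c :: t) = false := isPrefixOf_eq_false_of_not _ _ h3
              have b4 : K4.isPrefixOf (c :: t) = false := isPrefixOf_eq_false_of_not _ _ h4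
              have nb2 : K2.isPrefixOf (c :: rep K1 V1 t) = false := by
                apply isPrefixOf_eq_false_of_not
                intro hpre
                rw [show K2 = 'p' :: T2 from rfl, List.cons_prefix_cons] at hpre
                obtain ⟨hc, hpre⟩ := hpre
                have hT : T2 <+: t := rep_reflect K1 V1 T2 (by decide) t hpre
                exact h2 (List.cons_prefix_cons.mpr ⟨hc, hT⟩)
              have nb3 : K3.isPrefixOf (c :: rep K2 V1 (rep K1 V1 t)) = false := by
                apply isPrefixOf_eq_false_of_not
                intro hpre
                rw [show K3 = 'i' :: T3 from rfl, List.cons_prefix_cons] at hpre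
                obtain ⟨hc, hpre⟩ := hpre
                have hT : T3 <+: t :=
                  rep_reflect K1 V1 T3 (by decide) t
                    (rep_reflect K2 V1 T3 (by decide) _ hpre)
                exact h3 (List.cons_prefix_cons.mpr ⟨hc, hT⟩)
              have nb4 : K4.isPrefixOf (c :: rep K3 V2 (rep K2 V1 (rep K1 V1 t))) = false := by
                apply isPrefixOf_eq_false_of_not
                intro hpre
                rw [show K4 = 'i' :: T4 from rfl, List.cons_prefix_cons] at hpre
                obtain ⟨hc, hpre⟩ := hpre
                have hT : T4 <+: t :=
                  rep_reflect K1 V1 T4 (by decide) t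
                    (rep_reflect K2 V1 T4 (by decide) _
                      (rep_reflect K3 V2 T4 (by decide) _ hpre))
                exact h4 (List.cons_prefix_cons.mpr ⟨hc, hT⟩)
              rw [repA, rep_cons_neg _ _ _ _ b1, rep_cons_neg _ _ _ _ nb2,
                rep_cons_neg _ _ _ _ nb3, rep_cons_neg _ _ _ _ nb4,
                scanB_cons_neg c t b1 b2 b3 b4, ← repA,
                ih t (by simp at hs; omega)]

lemma repA_eq_scanB (s : List Char) : repA s = scanB s :=
  repA_eq_scanB_aux s.length s le_rfl

-- ===== VERDICT (by name: the statement is the Claim_ definition above) =====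
theorem reverse_nitter_urls_spec : Claim_equal_reverse_nitter_urls := by
  unfold Claim_equal_reverse_nitter_urls
  intro text _
  unfold Spec_reverse_nitter_urls reverse_nitter_urls reverse_nitter_urls_alt
  have h : (PySem.Str.replace (PySem.Str.replace (PySem.Str.replace
      (PySem.Str.replace text "piped.video/" "youtu.be/") "piped.kavin.rocks/" "youtu.be/")
      "inv.nadeko.net/" "youtube.com/") "invidious.snopyta.org/" "youtube.com/").toList
      = scanB text.toList := by
    simp only [PySem.Str.toList_replace]
    rw [replace_eq_rep _ _ _ (by decide), replace_eq_rep _ _ _ (by decide),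
      replace_eq_rep _ _ _ (by decide), replace_eq_rep _ _ _ (by decide)]
    rw [show "piped.video/".toList = K1 from by decide,
      show "piped.kavin.rocks/".toList = K2 from by decide,
      show "inv.nadeko.net/".toList = K3 from by decide,
      show "invidious.snopyta.org/".toList = K4 from by decide,
      show "youtu.be/".toList = V1 from by decide,
      show "youtube.com/".toList = V2 from by decide]
    exact repA_eq_scanB text.toList
  calc (PySem.Str.replace (PySem.Str.replace (PySem.Str.replace
        (PySem.Str.replace text "piped.video/" "youtu.be/") "piped.kavin.rocks/" "youtu.be/")
        "inv.nadeko.net/" "youtube.com/") "invidious.snopyta.org/" "youtube.com/")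
      = String.ofList ((PySem.Str.replace (PySem.Str.replace (PySem.Str.replace
        (PySem.Str.replace text "piped.video/" "youtu.be/") "piped.kavin.rocks/" "youtu.be/")
        "inv.nadeko.net/" "youtube.com/") "invidious.snopyta.org/" "youtube.com/").toList) :=
      String.ofList_toList.symm
    _ = String.ofList (scanB text.toList) := by rw [h]
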